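-- pv_equiv track=rewrite | github.com/ErikAlsterlind/Crypto | Python/PerformanceTestSha256.py | GetStrHammingWeight
-- ===== SOURCE A (Python) =====
-- def GetStrHammingWeight(string):
--     weight = 0
--     for char in string:
--         num_char = ord(char)
--         while num_char != 0:
--             if num_char & 1:
--                 weight += 1
--             num_char = num_char >> 1
--     return weight
-- ===== SOURCE B (Python) =====
-- # Table-driven popcount: a 256-entry table built once by dynamic programming
-- # (pc[i] = pc[i >> 1] + (i & 1)), then one table lookup per byte of each char code.
-- _TABLE = [0]
-- for _i in range(1, 256):
--     _TABLE.append(_TABLE[_i >> 1] + (_i & 1))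
--
--
-- def GetStrHammingWeight(string):
--     weight = 0
--     for char in string:
--         n = ord(char)
--         while n:
--             weight += _TABLE[n & 255]
--             n >>= 8
--     return weight
-- ===== Notes on version B (the rewrite author's own statement) =====
-- stated objective: faster
-- what changed: Replaced A's per-bit shift-and-test inner loop with a table-driven popcount: a 256-entry table is built once by dynamic programming (pc[i] = pc[i>>1] + (i&1)) and each char code is counted with one table lookup per byte instead of one loop iteration per bit.
import Mathlib
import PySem

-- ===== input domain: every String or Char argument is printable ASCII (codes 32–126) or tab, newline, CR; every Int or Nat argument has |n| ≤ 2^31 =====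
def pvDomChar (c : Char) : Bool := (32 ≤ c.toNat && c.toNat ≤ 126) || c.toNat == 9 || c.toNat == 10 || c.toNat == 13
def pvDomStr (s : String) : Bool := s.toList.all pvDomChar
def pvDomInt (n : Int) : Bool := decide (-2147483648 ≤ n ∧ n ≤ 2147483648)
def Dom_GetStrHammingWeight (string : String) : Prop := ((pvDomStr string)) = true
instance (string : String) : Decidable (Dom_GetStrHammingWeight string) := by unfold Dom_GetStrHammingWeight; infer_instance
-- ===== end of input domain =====

-- B replaces A's per-bit shift-and-test inner loop by a table-driven popcount: a 256-entry
-- table built once by dynamic programming (pc[i] = pc[i >> 1] + (i & 1)), then one table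
-- lookup per byte of each char code; return values agree on all domain strings.

-- ===== PORT A =====
-- inner while loop of A: shift right, testing bit 0 at each step
def pvShiftLoop (num_char : Nat) (weight : Int) : Int :=
  if h : num_char = 0 then weight
  else pvShiftLoop (num_char >>> 1) (if num_char &&& 1 ≠ 0 then weight + 1 else weight)
decreasing_by
  simp only [Nat.shiftRight_succ, Nat.shiftRight_zero]
  exact Nat.div_lt_self (Nat.pos_of_ne_zero h) one_lt_two

def GetStrHammingWeight (string : String) : Int :=
  string.toList.foldl (fun weight char => pvShiftLoop char.toNat weight) 0

-- ===== PORT B =====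
-- the DP popcount table: _TABLE = [0]; for i in range(1, 256): append(_TABLE[i>>1] + (i&1))
def pvTable : List Int :=
  (List.range' 1 255).foldl
    (fun t i => t ++ [t.getD (i >>> 1) 0 + ((i &&& 1 : Nat) : Int)]) [0]

-- inner while loop of B: add the table entry of the low byte, shift out the byte
def pvByteLoop (n : Nat) (weight : Int) : Int :=
  if h : n = 0 then weight
  else pvByteLoop (n >>> 8) (weight + pvTable.getD (n &&& 255) 0)
decreasing_by
  simp only [Nat.shiftRight_eq_div_pow]
  exact Nat.div_lt_self (Nat.pos_of_ne_zero h) (by norm_num)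

def GetStrHammingWeight_alt (string : String) : Int :=
  string.toList.foldl (fun weight char => pvByteLoop char.toNat weight) 0

-- ===== PRECONDITION & SPEC =====
def Spec_GetStrHammingWeight (string : String) (out : Int) : Prop := out = GetStrHammingWeight_alt string
instance (string : String) (out : Int) : Decidable (Spec_GetStrHammingWeight string out) := by unfold Spec_GetStrHammingWeight; infer_instance

-- ===== CLAIM (what is proved, stated in full; the proofs are below) =====
def Claim_equal_GetStrHammingWeight : Prop := ∀ (string : String), Dom_GetStrHammingWeight string → Spec_GetStrHammingWeight string (GetStrHammingWeight string)

-- ===== LEMMAS AND PROOFS =====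

-- A's inner loop adds a char-dependent count to the incoming weight
theorem pvShiftLoop_acc (n : Nat) (w : Int) : pvShiftLoop n w = w + pvShiftLoop n 0 := by
  induction n using Nat.strong_induction_on generalizing w with
  | _ n ih =>
    conv_lhs => rw [pvShiftLoop]
    conv_rhs => rw [pvShiftLoop]
    by_cases h : n = 0
    · simp [h]
    · simp only [h, dite_false]
      have hn2 : n >>> 1 = n / 2 := by
        simp [Nat.shiftRight_succ, Nat.shiftRight_zero]
      have hlt : n >>> 1 < n := by
        rw [hn2]; exact Nat.div_lt_self (Nat.pos_of_ne_zero h) one_lt_two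
      rw [ih _ hlt, ih _ hlt (w := if n &&& 1 ≠ 0 then (0:Int) + 1 else 0)]
      split_ifs <;> ring

-- one unfolding of A's inner loop, additively
theorem pvShiftLoop_step (n : Nat) (h : n ≠ 0) :
    pvShiftLoop n 0 = pvShiftLoop (n >>> 1) 0 + ((n &&& 1 : Nat) : Int) := by
  conv_lhs => rw [pvShiftLoop]
  simp only [h, dite_false]
  rw [pvShiftLoop_acc]
  have : n &&& 1 = n % 2 := Nat.and_one_is_mod n
  rcases Nat.mod_two_eq_zero_or_one n with hm | hm <;>
    simp [this, hm] <;> ring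

-- the table build computes exactly A's per-value count, as a map over range
theorem pvTable_build (k : Nat) (hk : k ≤ 255) :
    (List.range' 1 k).foldl
      (fun t i => t ++ [t.getD (i >>> 1) 0 + ((i &&& 1 : Nat) : Int)]) [0]
      = (List.range (k + 1)).map (fun i => pvShiftLoop i 0) := by
  induction k with
  | zero =>
    simp [List.range', List.range_succ]
    rw [pvShiftLoop]; simp
  | succ k ih =>
    have hk' : k ≤ 255 := Nat.le_of_succ_le hk
    rw [List.range'_1_concat, List.foldl_append, ih hk']
    simp only [List.foldl_cons, List.foldl_nil]
    have hlt : (1 + k) >>> 1 < k + 1 := by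
      have : (1 + k) >>> 1 = (1 + k) / 2 := by
        simp [Nat.shiftRight_succ, Nat.shiftRight_zero]
      omega
    have hget : ((List.range (k + 1)).map (fun i => pvShiftLoop i 0)).getD ((1 + k) >>> 1) 0
        = pvShiftLoop ((1 + k) >>> 1) 0 := by
      rw [List.getD_eq_getElem?_getD, List.getElem?_map, List.getElem?_range hlt]
      rfl
    rw [hget]
    conv_rhs => rw [List.range_succ, List.map_append]
    congr 1
    have hco : 1 + k = k + 1 := Nat.add_comm 1 k
    simp only [List.map_cons, List.map_nil, hco]
    rw [pvShiftLoop_step (k + 1) (Nat.succ_ne_zero k)]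

-- table lookup = A's inner count, for all byte values
theorem pvTable_getD (n : Nat) (hn : n < 256) :
    pvTable.getD n 0 = pvShiftLoop n 0 := by
  unfold pvTable
  rw [pvTable_build 255 (le_refl _)]
  rw [List.getD_eq_getElem?_getD, List.getElem?_map, List.getElem?_range hn]
  rfl

set_option maxRecDepth 4096 in
theorem and_255_of_lt : ∀ n < 256, n &&& 255 = n := by decide

-- for values below 256 (every domain char code), B's inner loop equals A's
theorem loops_eq (n : Nat) (hn : n < 256) (w : Int) :
    pvShiftLoop n w = pvByteLoop n w := by
  rw [pvShiftLoop_acc, pvByteLoop]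
  by_cases h : n = 0
  · subst h; rw [pvShiftLoop]; simp
  · simp only [h, dite_false]
    have h8 : n >>> 8 = 0 := by
      simp only [Nat.shiftRight_eq_div_pow]
      omega
    have h0 : ∀ x : Int, pvByteLoop 0 x = x := fun x => by rw [pvByteLoop]; simp
    rw [h8, h0, and_255_of_lt n hn, pvTable_getD n hn]

-- the two folds agree whenever every char code is below 256
theorem folds_eq (l : List Char) (w : Int) (hall : ∀ c ∈ l, c.toNat < 256) :
    l.foldl (fun weight char => pvShiftLoop char.toNat weight) w
      = l.foldl (fun weight char => pvByteLoop char.toNat weight) w := by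
  induction l generalizing w with
  | nil => rfl
  | cons c cs ih =>
    simp only [List.foldl_cons]
    rw [loops_eq c.toNat (hall c (List.mem_cons_self)) w]
    exact ih _ (fun d hd => hall d (List.mem_cons_of_mem _ hd))

-- ===== VERDICT (by name: the statement is the Claim_ definition above) =====
theorem GetStrHammingWeight_spec : Claim_equal_GetStrHammingWeight := by
  intro s hdom
  unfold Spec_GetStrHammingWeight GetStrHammingWeight GetStrHammingWeight_alt
  apply folds_eq
  intro c hc
  have := List.all_eq_true.mp hdom c hc
  simp only [pvDomChar, Bool.or_eq_true, Bool.and_eq_true, decide_eq_true_eq,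
    beq_iff_eq] at this
  omega
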